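-- pv_equiv track=rewrite | github.com/koreabeginner96/CordingTest | 20230_04_26/pro_2_PostBox(R).py | solution
-- ===== SOURCE A (Python) =====
-- from collections import deque
--
-- def solution(order):
--     answer=0
--     container=[]
--     order=deque(order)
--     for i in range(1,len(order)+1):
--         container.append(i)
--         while container and order[0] == container[-1]:
--             answer+=1
--             order.popleft()
--             container.pop()
--     return answer
-- ===== SOURCE B (Python) =====
-- def solution(order):
--     answer = 0
--     stack = []
--     nxt = 1
--     n = len(order)
--     for v in order:
--         while nxt <= n and (not stack or stack[-1] != v):
--             stack.append(nxt)
--             nxt += 1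
--         if stack and stack[-1] == v:
--             stack.pop()
--             answer += 1
--         else:
--             break
--     return answer
-- ===== Notes on version B (the rewrite author's own statement) =====
-- stated objective: alternative
-- what changed: B iterates over the target sequence `order` itself, pushing fresh box numbers on demand in an inner while-loop and popping one box per order element (breaking when no match is possible), instead of A's loop over i=1..n that pushes each i and pops all matching fronts of a deque.
import Mathlib
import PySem

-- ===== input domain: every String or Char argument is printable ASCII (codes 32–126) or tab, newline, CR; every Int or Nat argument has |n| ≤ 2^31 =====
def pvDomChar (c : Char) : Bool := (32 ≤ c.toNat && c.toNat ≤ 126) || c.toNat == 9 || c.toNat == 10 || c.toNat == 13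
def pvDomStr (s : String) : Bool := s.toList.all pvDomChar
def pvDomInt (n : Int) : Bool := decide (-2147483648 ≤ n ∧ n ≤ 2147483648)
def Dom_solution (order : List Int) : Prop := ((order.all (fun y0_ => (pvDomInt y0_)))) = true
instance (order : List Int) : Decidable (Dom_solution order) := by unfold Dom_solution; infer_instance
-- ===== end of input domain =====

-- B is an alternative O(n) decomposition: it loops over `order`, pushing box numbers on
-- demand, instead of A's loop over box numbers 1..n popping all matching fronts.

-- ===== PORT A =====
-- Inner while-loop of A: pop while the container top equals the front of the order deque.
-- Stacks are represented with the top at the HEAD of the list (Python's container[-1]).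
def pvPopA : List Int → List Int → Int → List Int × List Int × Int
  | v :: os, c :: cs, a => if v = c then pvPopA os cs (a + 1) else (v :: os, c :: cs, a)
  | o, c, a => (o, c, a)

-- Outer `for i in range(1, len(order)+1)` loop of A, as a counter recursion.
def pvLoopA (n i : Int) (ord cont : List Int) (a : Int) : Int :=
  if i ≤ n then
    let r := pvPopA ord (i :: cont) a
    pvLoopA n (i + 1) r.1 r.2.1 r.2.2
  else a
termination_by (n + 1 - i).toNat
decreasing_by omega

def solution (order : List Int) : Int :=
  pvLoopA (order.length : Int) 1 order [] 0

-- ===== PORT B =====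
-- Inner while-loop of B: push nxt while nxt <= n and the stack top is not v.
def pvFill (n v nxt : Int) (stack : List Int) : Int × List Int :=
  if nxt ≤ n ∧ stack.head? ≠ some v then pvFill n v (nxt + 1) (nxt :: stack)
  else (nxt, stack)
termination_by (n + 1 - nxt).toNat
decreasing_by omega

-- Outer `for v in order` loop of B, with the break as an early return.
def pvLoopB (n : Int) : List Int → Int → List Int → Int → Int
  | [], _, _, a => a
  | v :: os, nxt, stack, a =>
    let r := pvFill n v nxt stack
    match r.2 with
    | t :: rest => if t = v then pvLoopB n os r.1 rest (a + 1) else a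
    | [] => a

def solution_alt (order : List Int) : Int :=
  pvLoopB (order.length : Int) order 1 [] 0

-- ===== PRECONDITION & SPEC =====
def Spec_solution (order : List Int) (out : Int) : Prop := out = solution_alt order
instance (order : List Int) (out : Int) : Decidable (Spec_solution order out) := by unfold Spec_solution; infer_instance

-- ===== CLAIM (what is proved, stated in full; the proofs are below) =====
def Claim_equal_solution : Prop := ∀ (order : List Int), Dom_solution order → Spec_solution order (solution order)

-- ===== LEMMAS AND PROOFS =====

-- "Normalized" state: no immediate match between the order front and the stack top.
def pvNorm (ord stack : List Int) : Prop :=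
  ord = [] ∨ stack = [] ∨ ord.head? ≠ stack.head?

lemma pvPopA_nil (cont : List Int) (a : Int) : pvPopA [] cont a = ([], cont, a) := by
  cases cont <;> simp [pvPopA]

lemma pvLoopA_nil (n : Int) : ∀ (k : Nat) (i : Int), (n + 1 - i).toNat = k →
    ∀ (cont : List Int) (a : Int), pvLoopA n i [] cont a = a := by
  intro k
  induction k with
  | zero =>
    intro i hk cont a
    rw [pvLoopA]
    have : ¬ i ≤ n := by omega
    simp [this]
  | succ m ih =>
    intro i hk cont a
    rw [pvLoopA]
    by_cases h : i ≤ n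
    · simp only [h, if_pos, pvPopA_nil]
      exact ih (i + 1) (by omega) _ a
    · simp [h]

lemma pvPopA_norm : ∀ (ord cont : List Int) (a : Int),
    pvNorm (pvPopA ord cont a).1 (pvPopA ord cont a).2.1 := by
  intro ord
  induction ord with
  | nil => intro cont a; rw [pvPopA_nil]; left; rfl
  | cons v os ih =>
    intro cont a
    cases cont with
    | nil => simp [pvPopA, pvNorm]
    | cons c cs =>
      by_cases h : v = c
      · simp only [pvPopA, h, if_pos]
        exact ih cs (a + 1)
      · simp only [pvPopA, if_neg h]
        right; right; simp [h]

-- Aligning A's multi-pop with B's one-pop-per-order-element loop.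
lemma pvLoopB_pop (n i : Int) : ∀ (ord cont : List Int) (a : Int),
    pvLoopB n ord i cont a =
      pvLoopB n (pvPopA ord cont a).1 i (pvPopA ord cont a).2.1 (pvPopA ord cont a).2.2 := by
  intro ord
  induction ord with
  | nil => intro cont a; rw [pvPopA_nil]
  | cons v os ih =>
    intro cont a
    cases cont with
    | nil => simp [pvPopA]
    | cons c cs =>
      by_cases h : v = c
      · subst h
        have hfill : pvFill n v i (v :: cs) = (i, v :: cs) := by
          rw [pvFill]; simp
        simp only [pvPopA, reduceIte]
        rw [pvLoopB]
        simp only [hfill, reduceIte]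
        exact ih cs (a + 1)
      · simp only [pvPopA, if_neg h]

-- One push of B's fill loop.
lemma pvFill_step (n v nxt : Int) (stack : List Int)
    (h1 : nxt ≤ n) (h2 : stack.head? ≠ some v) :
    pvFill n v nxt stack = pvFill n v (nxt + 1) (nxt :: stack) := by
  rw [pvFill]; simp [h1, h2]

-- Main simulation lemma: from any normalized state, A's loop and B's loop agree.
lemma pvMain (n : Int) : ∀ (k : Nat) (i : Int), (n + 1 - i).toNat = k →
    ∀ (ord cont : List Int) (a : Int), pvNorm ord cont →
      pvLoopA n i ord cont a = pvLoopB n ord i cont a := by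
  intro k
  induction k using Nat.strong_induction_on with
  | _ k ih =>
    intro i hk ord cont a hnorm
    cases ord with
    | nil => rw [pvLoopA_nil n k i hk]; rfl
    | cons v os =>
      by_cases hin : i ≤ n
      · -- A pushes i, then pops matches
        rw [pvLoopA]
        simp only [hin, if_pos]
        have htop : cont.head? ≠ some v := by
          rcases hnorm with h | h | h
          · exact absurd h (by simp)
          · subst h; simp
          · cases cont with
            | nil => simp
            | cons c cs => simp at h ⊢; intro hc; exact h hc.symm
        by_cases hv : v = i
        · -- the newly pushed i matches the order front: A pops it (and more);
          -- B pushes i in its fill loop, then pops it and continues.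
          subst hv
          have hpop : pvPopA (v :: os) (v :: cont) a = pvPopA os cont (a + 1) := by
            simp [pvPopA]
          have hrec := ih (n + 1 - (v + 1)).toNat (by omega) (v + 1) rfl
            (pvPopA os cont (a + 1)).1 (pvPopA os cont (a + 1)).2.1
            (pvPopA os cont (a + 1)).2.2 (pvPopA_norm os cont (a + 1))
          have hB : pvLoopB n (v :: os) v cont a =
              pvLoopB n (pvPopA os cont (a + 1)).1 (v + 1)
                (pvPopA os cont (a + 1)).2.1 (pvPopA os cont (a + 1)).2.2 := by
            have hstop : pvFill n v (v + 1) (v :: cont) = (v + 1, v :: cont) := by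
              rw [pvFill]; simp
            rw [pvLoopB]
            rw [pvFill_step n v v cont hin htop]
            simp only [hstop, reduceIte]
            exact pvLoopB_pop n (v + 1) os cont (a + 1)
          rw [hpop, hrec, hB]
        · -- i does not match: A's pop loop is a no-op; B pushes i and keeps filling.
          have hpop : pvPopA (v :: os) (i :: cont) a = (v :: os, i :: cont, a) := by
            simp [pvPopA]; intro hvi; exact absurd hvi hv
          rw [hpop]
          have hrec := ih (n + 1 - (i + 1)).toNat (by omega) (i + 1) rfl
            (v :: os) (i :: cont) a (by right; right; simp; intro h; exact hv h)
          rw [hrec]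
          rw [pvLoopB, pvLoopB, pvFill_step n v i cont hin htop]
      · -- i > n: A returns; B's fill is a no-op and the top cannot match.
        rw [pvLoopA]
        simp only [hin, if_false]
        have hstop : pvFill n v i cont = (i, cont) := by
          rw [pvFill]; simp; intro h; omega
        rw [pvLoopB]
        simp only [hstop]
        rcases hnorm with h | h | h
        · exact absurd h (by simp)
        · subst h; rfl
        · cases cont with
          | nil => rfl
          | cons c cs =>
            simp at h
            simp only []
            rw [if_neg (by intro hc; exact h hc.symm)]

-- ===== VERDICT (by name: the statement is the Claim_ definition above) =====
theorem solution_spec : Claim_equal_solution := by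
  intro order _
  unfold Spec_solution solution solution_alt
  exact pvMain (order.length : Int) _ 1 rfl order [] 0 (Or.inr (Or.inl rfl))
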